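-- pv_equiv track=rewrite | github.com/minu0508/Algorithm | Python/Programmers/Level_1/과일 장수.py | solution
-- ===== SOURCE A (Python) =====
-- def solution(k, m, score):
--     answer = 0
--     score.sort()
--
--     for i in range(len(score) // m):
--         Save_Box = []
--         for j in range(0, m, 1):
--             Save_Box.append(score[-1])
--             score.pop()
--         answer += min(Save_Box) * m
--
--     return answer
-- ===== SOURCE B (Python) =====
-- def solution(k, m, score):
--     s = sorted(score)
--     n = len(s)
--     return m * sum(s[n - (i + 1) * m] for i in range(n // m))
-- ===== Notes on version B (the rewrite author's own statement) =====
-- stated objective: simpler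
-- what changed: Replaces the nested pop-loop with its Save_Box accumulator and min() scan by direct index arithmetic on a sorted copy: the i-th group's minimum sits at index n-(i+1)*m, so the answer is m times a single sum over n//m indices; Pre_ excludes m = 0, on which A raises ZeroDivisionError (B does too).
import Mathlib
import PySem

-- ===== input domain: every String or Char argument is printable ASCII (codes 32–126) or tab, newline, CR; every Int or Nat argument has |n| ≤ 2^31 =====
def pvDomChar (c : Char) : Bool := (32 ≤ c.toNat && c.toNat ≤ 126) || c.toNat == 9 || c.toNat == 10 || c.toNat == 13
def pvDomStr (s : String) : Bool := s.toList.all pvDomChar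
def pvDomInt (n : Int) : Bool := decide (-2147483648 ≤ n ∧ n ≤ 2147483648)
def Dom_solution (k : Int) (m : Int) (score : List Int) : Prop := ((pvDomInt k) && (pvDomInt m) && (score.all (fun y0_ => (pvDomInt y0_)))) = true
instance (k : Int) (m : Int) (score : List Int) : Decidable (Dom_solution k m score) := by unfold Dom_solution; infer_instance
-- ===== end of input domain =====

-- B replaces A's nested pop-loop/min() scan by direct index arithmetic on a sorted copy
-- (simpler).  A mutates its argument in place (B does not); equivalence is about the
-- RETURN value only.

-- ===== PORT A =====
def solution (k : Int) (m : Int) (score : List Int) : Int :=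
  -- answer = 0; score.sort()
  let s0 := PySem.List.sorted score (fun x => x) false
  -- for i in range(len(score) // m): … (state = (score, answer))
  let st := (PySem.List.pyRange 0 (PySem.Int.floordiv (s0.length : Int) m) 1).foldl
    (fun (st : List Int × Int) _i =>
      -- Save_Box = []; for j in range(0, m, 1): Save_Box.append(score[-1]); score.pop()
      let inner := (PySem.List.pyRange 0 m 1).foldl
        (fun (p : List Int × List Int) _j =>
          (p.1 ++ [PySem.List.pyGetD p.2 (-1) 0], p.2.dropLast))
        (([] : List Int), st.1)
      -- answer += min(Save_Box) * m
      (inner.2, st.2 + ((PySem.List.min? inner.1 (fun x => x)).getD 0) * m))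
    (s0, 0)
  st.2

-- ===== PORT B =====
def solution_alt (k : Int) (m : Int) (score : List Int) : Int :=
  let s := PySem.List.sorted score (fun x => x) false
  let n : Int := s.length
  m * ((PySem.List.pyRange 0 (PySem.Int.floordiv n m) 1).foldl
        (fun acc i => acc + PySem.List.pyGetD s (n - (i + 1) * m) 0) 0)

-- ===== PRECONDITION & SPEC =====
-- Pre_ excludes only m = 0, on which A raises ZeroDivisionError (len(score) // m); B raises too.
def Pre_solution (k : Int) (m : Int) (score : List Int) : Prop := m ≠ 0
instance (k : Int) (m : Int) (score : List Int) : Decidable (Pre_solution k m score) := by unfold Pre_solution; infer_instance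
def pvWitness_solution : Int × Int × List Int := (4, 2, [1, 4, 2, 5, 3, 6, 0])

def Spec_solution (k : Int) (m : Int) (score : List Int) (out : Int) : Prop := out = solution_alt k m score
instance (k : Int) (m : Int) (score : List Int) (out : Int) : Decidable (Spec_solution k m score out) := by unfold Spec_solution; infer_instance

-- ===== CLAIM (what is proved, stated in full; the proofs are below) =====
def Claim_equal_solution : Prop := ∀ (k : Int) (m : Int) (score : List Int), Dom_solution k m score → Pre_solution k m score → Spec_solution k m score (solution k m score)

-- ===== LEMMAS AND PROOFS =====

theorem inner_char (M : Nat) (t : List Int) (box : List Int) (hM : M ≤ t.length) :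
    (PySem.List.pyRange 0 (M : Int) 1).foldl
      (fun (p : List Int × List Int) _j =>
        (p.1 ++ [PySem.List.pyGetD p.2 (-1) 0], p.2.dropLast)) (box, t)
    = (box ++ (t.drop (t.length - M)).reverse, t.take (t.length - M)) := by
  induction M with
  | zero => simp
  | succ M ih =>
    have hM' : M ≤ t.length := by omega
    have hsplit : PySem.List.pyRange 0 ((M + 1 : Nat) : Int) 1
        = PySem.List.pyRange 0 (M : Int) 1 ++ [(M : Int)] := by
      push_cast
      exact PySem.List.pyRange_one_succ_right (Int.natCast_nonneg M)
    rw [hsplit, List.foldl_append, ih hM']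
    simp only [List.foldl_cons, List.foldl_nil]
    have hlen : (t.take (t.length - M)).length = t.length - M := by
      simp
    have hne : t.take (t.length - M) ≠ [] := by
      rw [← List.length_pos_iff, hlen]
      omega
    have hget : PySem.List.pyGetD (t.take (t.length - M)) (-1) 0
        = t[t.length - (M + 1)]'(by omega) := by
      rw [PySem.List.pyGetD_neg_one _ _ hne, List.getLast_eq_getElem]
      simp only [hlen, List.getElem_take]
      simp only [show t.length - M - 1 = t.length - (M + 1) from by omega]
    have hdrop : t.drop (t.length - (M + 1))
        = t[t.length - (M + 1)]'(by omega) :: t.drop (t.length - M) := by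
      have h1 : t.length - (M + 1) + 1 = t.length - M := by omega
      rw [List.drop_eq_getElem_cons (by omega), h1]
    have hdl : (t.take (t.length - M)).dropLast = t.take (t.length - (M + 1)) := by
      rw [List.dropLast_eq_take, hlen, List.take_take]
      congr 1 <;> omega
    rw [hget, hdl, hdrop]
    simp

theorem min_rev_sorted (u : List Int) (h : u.Pairwise (· ≤ ·)) (hne : u ≠ []) :
    (PySem.List.min? u.reverse (fun x => x)).getD 0 = u.head hne := by
  cases hmin : PySem.List.min? u.reverse (fun x => x) with
  | none =>
    rw [PySem.List.min?_eq_none_iff] at hmin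
    simp at hmin
    exact absurd hmin hne
  | some v =>
    have hmem : v ∈ u := by
      have := PySem.List.min?_mem hmin
      simpa using this
    have hle : v ≤ u.head hne := by
      have := PySem.List.min?_isMin hmin (u.head hne) (by simp [List.head_mem])
      simpa using this
    have hge : u.head hne ≤ v := by
      obtain ⟨a, tl, rfl⟩ := List.exists_cons_of_ne_nil hne
      rcases List.mem_cons.mp hmem with rfl | hv
      · simp
      · exact List.rel_of_pairwise_cons h hv
    simpa using le_antisymm hle hge

theorem outer_char (m : Int) (hm : 0 < m) (s : List Int) (hs : s.Pairwise (· ≤ ·))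
    (G : Nat) (hG : G * m.toNat ≤ s.length) (a : Int) :
    (PySem.List.pyRange 0 (G : Int) 1).foldl
      (fun (st : List Int × Int) _i =>
        let inner := (PySem.List.pyRange 0 m 1).foldl
          (fun (p : List Int × List Int) _j =>
            (p.1 ++ [PySem.List.pyGetD p.2 (-1) 0], p.2.dropLast))
          (([] : List Int), st.1)
        (inner.2, st.2 + ((PySem.List.min? inner.1 (fun x => x)).getD 0) * m))
      (s, a)
    = (s.take (s.length - G * m.toNat),
       a + m * ((PySem.List.pyRange 0 (G : Int) 1).foldl
          (fun acc i => acc + PySem.List.pyGetD s ((s.length : Int) - (i + 1) * m) 0) 0)) := by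
  set M := m.toNat with hMdef
  have hmM : m = (M : Int) := by omega
  have hMpos : 0 < M := by omega
  induction G generalizing a with
  | zero => simp
  | succ G ih =>
    have hG' : G * M ≤ s.length := by
      have : (G + 1) * M = G * M + M := by ring
      omega
    have hsplit : PySem.List.pyRange 0 ((G + 1 : Nat) : Int) 1
        = PySem.List.pyRange 0 (G : Int) 1 ++ [(G : Int)] := by
      push_cast
      exact PySem.List.pyRange_one_succ_right (Int.natCast_nonneg G)
    rw [hsplit, List.foldl_append, List.foldl_append, ih a hG']
    simp only [List.foldl_cons, List.foldl_nil]
    -- the single extra step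
    set t := s.take (s.length - G * M) with htdef
    have htlen : t.length = s.length - G * M := by simp [htdef]
    have hexp : (G + 1) * M = G * M + M := by ring
    have hMt : M ≤ t.length := by omega
    have hinner := inner_char M t [] hMt
    rw [hmM]
    rw [hinner]
    -- the popped segment
    have hpos1 : 0 < (G + 1) * M := Nat.mul_pos (Nat.succ_pos G) hMpos
    have hidx : s.length - (G + 1) * M < s.length := by omega
    set u := t.drop (t.length - M) with hudef
    have hulen : u.length = M := by simp [hudef]; omega
    have hune : u ≠ [] := by rw [← List.length_pos_iff, hulen]; omega
    have hupair : u.Pairwise (· ≤ ·) := ((hs.sublist (List.take_sublist _ _)).sublist (List.drop_sublist _ _))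
    have huhead : u.head hune = s[s.length - (G + 1) * M]'hidx := by
      rw [List.head_eq_getElem]
      simp only [hudef, List.getElem_drop, htdef, List.getElem_take]
      congr 1 <;> · simp only [List.length_take]; omega
    have hmin : (PySem.List.min? u.reverse (fun x => x)).getD 0
        = s[s.length - (G + 1) * M]'hidx := by
      rw [min_rev_sorted u hupair hune, huhead]
    have htt : t.take (t.length - M) = s.take (s.length - (G + 1) * M) := by
      rw [htdef, List.take_take]
      congr 1
      simp only [List.length_take]
      omega
    have hc : ((G : Int) + 1) * (M : Int) = (((G + 1) * M : Nat) : Int) := by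
      push_cast; ring
    have hgetB : PySem.List.pyGetD s ((s.length : Int) - ((G : Int) + 1) * (M : Int)) 0
        = s[s.length - (G + 1) * M]'hidx := by
      rw [hc, PySem.List.pyGetD_eq_getElem s 0 (by omega) (by omega)]
      congr 1
      omega
    simp only [List.nil_append]
    rw [hmin, htt, hgetB]
    rw [Prod.mk.injEq]
    exact ⟨rfl, by ring⟩


-- ===== VERDICT (by name: the statement is the Claim_ definition above) =====
theorem solution_spec : Claim_equal_solution := by
  intro k m score _hdom hpre
  unfold Spec_solution solution solution_alt
  dsimp only
  set s := PySem.List.sorted score (fun x => x) false with hsdef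
  by_cases hm : 0 < m
  · have hmM : m = (m.toNat : Int) := by omega
    have hfd : PySem.Int.floordiv (s.length : Int) m
        = ((s.length / m.toNat : Nat) : Int) := by
      rw [hmM]
      exact PySem.Int.floordiv_natCast s.length m.toNat
    have hout := outer_char m hm s
      (by simpa using PySem.List.sorted_pairwise score (fun x => x))
      (s.length / m.toNat) (Nat.div_mul_le_self _ _) 0
    rw [hfd, hout]
    simp
  · have hm' : m < 0 := by
      have : m ≠ 0 := hpre
      omega
    have h1 := PySem.Int.floordiv_mul_add_mod (s.length : Int) m
    have h2 := PySem.Int.mod_neg_bounds (s.length : Int) hm'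
    have hg : PySem.Int.floordiv (s.length : Int) m ≤ 0 := by
      by_contra hpos
      rw [not_le] at hpos
      nlinarith [Int.natCast_nonneg s.length]
    rw [PySem.List.pyRange_one_eq_nil hg]
    simp
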